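-- pv_equiv track=rewrite | github.com/wangpatrick57/plant | tools/bv2el.py | get_el_from_bv
-- ===== SOURCE A (Python) =====
-- def get_el_from_bv(size, bit_vector):
--     el = []
--
--     for left_edge in range(size - 1, -1, -1):
--         for bot_edge in range(left_edge - 1, -1, -1):
--             if bit_vector % 2 == 1:
--                 el.append((left_edge, bot_edge))
--
--             bit_vector >>= 1
--
--     return el
-- ===== SOURCE B (Python) =====
-- def _tri_root(s, hi):
--     # largest L in [1, hi] with L*(L-1)//2 < s, by binary search
--     # (valid when 1 <= s and the answer lies in [1, hi])
--     lo = 1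
--     while lo < hi:
--         mid = (lo + hi + 1) // 2
--         if mid * (mid - 1) // 2 < s:
--             lo = mid
--         else:
--             hi = mid - 1
--     return lo
--
--
-- def get_el_from_bv(size, bit_vector):
--     # Decode each set bit of the vector directly: bit index k corresponds to
--     # s = t - k, whose left edge is the triangular-number inverse of s.
--     if size < 2:
--         return []
--     t = size * (size - 1) // 2
--     el = []
--     for k in range(t):
--         rest = bit_vector >> k
--         if rest == 0:
--             break
--         if rest & 1:
--             s = t - k
--             left = _tri_root(s, size - 1)
--             el.append((left, s - 1 - left * (left - 1) // 2))
--     return el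
-- ===== Notes on version B (the rewrite author's own statement) =====
-- stated objective: faster
-- what changed: Instead of A's nested countdown loops that enumerate every candidate edge while shifting the vector one bit per step, B scans bit indices once, stops at the highest set bit, and maps each set bit's index to its edge pair arithmetically via a binary-search triangular-number inverse.
import Mathlib
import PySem

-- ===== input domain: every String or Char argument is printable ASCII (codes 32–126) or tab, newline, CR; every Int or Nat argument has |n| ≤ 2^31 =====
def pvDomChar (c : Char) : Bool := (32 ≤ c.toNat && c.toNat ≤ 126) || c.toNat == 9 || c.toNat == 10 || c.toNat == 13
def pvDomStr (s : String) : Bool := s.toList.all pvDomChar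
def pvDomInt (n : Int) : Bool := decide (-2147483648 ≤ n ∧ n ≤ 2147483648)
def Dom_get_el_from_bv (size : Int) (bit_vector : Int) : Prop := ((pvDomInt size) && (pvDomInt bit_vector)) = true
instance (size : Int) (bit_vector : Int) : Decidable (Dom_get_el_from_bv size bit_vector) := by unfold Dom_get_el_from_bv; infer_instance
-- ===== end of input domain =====

-- B decodes each set bit of the vector directly into its edge via a triangular-number
-- inverse (binary search), instead of A's nested countdown loops that shift the whole
-- vector one bit per candidate edge; faster on sparse vectors (stops at the highest set bit).

-- ===== PORT A =====
def get_el_from_bv (size : Int) (bit_vector : Int) : List (Int × Int) :=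
  ((PySem.List.pyRange (size - 1) (-1) (-1)).foldl
    (fun (st : Int × List (Int × Int)) left_edge =>
      (PySem.List.pyRange (left_edge - 1) (-1) (-1)).foldl
        (fun (st : Int × List (Int × Int)) bot_edge =>
          let st := if PySem.Int.mod st.1 2 = 1 then (st.1, st.2 ++ [(left_edge, bot_edge)]) else st
          (st.1 >>> (1 : Nat), st.2))
        st)
    (bit_vector, ([] : List (Int × Int)))).2

-- ===== PORT B =====
-- port of Source B's _tri_root: binary search for the largest L in [lo, hi] with L*(L-1)//2 < s
def triGo (s lo hi : Int) : Int :=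
  if lo < hi then
    let mid := PySem.Int.floordiv (lo + hi + 1) 2
    if PySem.Int.floordiv (mid * (mid - 1)) 2 < s then triGo s mid hi
    else triGo s lo (mid - 1)
  else lo
termination_by (hi - lo).toNat
decreasing_by
  all_goals
    simp only [PySem.Int.floordiv_eq_ediv_of_pos (by norm_num : (0:Int) < 2)] at *
    omega

def triRoot (s hi : Int) : Int := triGo s 1 hi

-- port of Source B's main loop: `for k in range(t)` with an early break once the rest of the
-- vector is zero; `rem` is the number of remaining iterations (t - k)
def altLoop (bit_vector t hi : Int) (k : Int) (rem : Nat) (el : List (Int × Int)) :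
    List (Int × Int) :=
  match rem with
  | 0 => el
  | rem' + 1 =>
    let rest := bit_vector >>> k.toNat
    if rest = 0 then el
    else
      let el :=
        if PySem.Int.band rest 1 = 1 then
          let s := t - k
          let left := triRoot s hi
          el ++ [(left, s - 1 - PySem.Int.floordiv (left * (left - 1)) 2)]
        else el
      altLoop bit_vector t hi (k + 1) rem' el

def get_el_from_bv_alt (size : Int) (bit_vector : Int) : List (Int × Int) :=
  if size < 2 then []
  else
    let t := PySem.Int.floordiv (size * (size - 1)) 2
    altLoop bit_vector t (size - 1) 0 t.toNat []

-- ===== PRECONDITION & SPEC =====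
def Spec_get_el_from_bv (size : Int) (bit_vector : Int) (out : List (Int × Int)) : Prop := out = get_el_from_bv_alt size bit_vector
instance (size : Int) (bit_vector : Int) (out : List (Int × Int)) : Decidable (Spec_get_el_from_bv size bit_vector out) := by unfold Spec_get_el_from_bv; infer_instance

-- ===== CLAIM (what is proved, stated in full; the proofs are below) =====
def Claim_equal_get_el_from_bv : Prop := ∀ (size : Int) (bit_vector : Int), Dom_get_el_from_bv size bit_vector → Spec_get_el_from_bv size bit_vector (get_el_from_bv size bit_vector)

-- ===== LEMMAS AND PROOFS =====

-- [size-1, size-2, ..., 0] as a recursive list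
def pvDesc : Nat → List Int
  | 0 => []
  | m + 1 => (m : Int) :: pvDesc m

-- the pairs A enumerates, as a recursive list (outermost block first)
def pvPairs : Nat → List (Int × Int)
  | 0 => []
  | m + 1 => (pvDesc m).map (fun b => ((m : Int), b)) ++ pvPairs m

-- number of pairs
def pvTn : Nat → Nat
  | 0 => 0
  | m + 1 => m + pvTn m

def pvTri (L : Int) : Int := L * (L - 1) / 2

-- A's per-pair step and its sequential bit consumption
def pvStep (st : Int × List (Int × Int)) (p : Int × Int) : Int × List (Int × Int) :=
  let st := if PySem.Int.mod st.1 2 = 1 then (st.1, st.2 ++ [p]) else st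
  (st.1 >>> (1 : Nat), st.2)

def pvPick (bv : Int) : List (Int × Int) → List (Int × Int)
  | [] => []
  | p :: r => (if PySem.Int.mod bv 2 = 1 then [p] else []) ++ pvPick (bv >>> (1 : Nat)) r

theorem pvDesc_range (m : Nat) :
    PySem.List.pyRange ((m : Int) - 1) (-1) (-1) = pvDesc m := by
  induction m with
  | zero =>
    have h0 : ((0 : Nat) : Int) - 1 = -1 := by norm_num
    rw [h0, PySem.List.pyRange_neg_one_eq_nil le_rfl]; rfl
  | succ m ih =>
    have h : ((m + 1 : Nat) : Int) - 1 = (m : Int) := by push_cast; ring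
    rw [h, PySem.List.pyRange_neg_one_cons (by omega)]
    rw [show pvDesc (m + 1) = (m : Int) :: pvDesc m from rfl]
    rw [show (m : Int) - 1 = ((m : Nat) : Int) - 1 from rfl, ih]

theorem pvDesc_range' (size : Int) :
    PySem.List.pyRange (size - 1) (-1) (-1) = pvDesc size.toNat := by
  rcases le_or_gt 0 size with h | h
  · have : size = (size.toNat : Int) := (Int.toNat_of_nonneg h).symm
    rw [this]; exact pvDesc_range _
  · have h0 : size.toNat = 0 := Int.toNat_of_nonpos (by omega)
    rw [h0, PySem.List.pyRange_neg_one_eq_nil (by omega)]; rfl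

theorem pvFold_inner (m : Nat) (st : Int × List (Int × Int)) :
    (pvDesc m).foldl (fun st L =>
        (PySem.List.pyRange (L - 1) (-1) (-1)).foldl
          (fun st b =>
            let st := if PySem.Int.mod st.1 2 = 1 then (st.1, st.2 ++ [(L, b)]) else st
            (st.1 >>> (1 : Nat), st.2)) st) st
      = (pvPairs m).foldl pvStep st := by
  induction m generalizing st with
  | zero => rfl
  | succ m ih =>
    rw [show pvDesc (m + 1) = (m : Int) :: pvDesc m from rfl]
    simp only [List.foldl_cons]
    rw [ih, pvDesc_range m, pvPairs, List.foldl_append]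
    congr 1
    rw [List.foldl_map]
    rfl

theorem pvFold_pick (l : List (Int × Int)) (bv : Int) (el : List (Int × Int)) :
    (l.foldl pvStep (bv, el)).2 = el ++ pvPick bv l := by
  induction l generalizing bv el with
  | nil => simp [pvPick]
  | cons p r ih =>
    show (r.foldl pvStep (pvStep (bv, el) p)).2 = _
    have hstep : pvStep (bv, el) p
        = (bv >>> (1 : Nat), if PySem.Int.mod bv 2 = 1 then el ++ [p] else el) := by
      unfold pvStep; split_ifs <;> rfl
    rw [pvPick, hstep, ih]
    split_ifs with h <;> simp

theorem pvA_char (size bit_vector : Int) :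
    get_el_from_bv size bit_vector = pvPick bit_vector (pvPairs size.toNat) := by
  unfold get_el_from_bv
  rw [pvDesc_range', pvFold_inner, pvFold_pick]
  simp

theorem pvPick_zero (l : List (Int × Int)) : pvPick 0 l = [] := by
  induction l with
  | nil => rfl
  | cons p r ih =>
    show (if PySem.Int.mod 0 2 = 1 then [p] else []) ++ pvPick ((0 : Int) >>> (1 : Nat)) r = []
    rw [show ((0 : Int) >>> (1 : Nat)) = 0 from by decide, if_neg (by decide), ih]
    rfl

theorem pvDesc_length (m : Nat) : (pvDesc m).length = m := by
  induction m with
  | zero => rfl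
  | succ m ih => simp [pvDesc, ih]

theorem pvPairs_length (m : Nat) : (pvPairs m).length = pvTn m := by
  induction m with
  | zero => rfl
  | succ m ih => simp [pvPairs, pvTn, ih, pvDesc_length]

theorem pvDesc_get (m i : Nat) (h : i < (pvDesc m).length) :
    (pvDesc m)[i] = (m : Int) - 1 - i := by
  induction m generalizing i with
  | zero => simp [pvDesc_length] at h
  | succ m ih =>
    cases i with
    | zero => simp [pvDesc]
    | succ i =>
      have h' : i < (pvDesc m).length := by
        simpa [pvDesc] using h
      show (pvDesc m)[i] = _
      rw [ih i h']
      push_cast; ring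

theorem pvTri_cast (m : Nat) : pvTri (m : Int) = (pvTn m : Int) := by
  induction m with
  | zero => rfl
  | succ m ih =>
    have hTn : pvTn (m + 1) = m + pvTn m := rfl
    unfold pvTri
    rw [hTn]
    push_cast
    have h : ((m : Int) + 1) * ((m : Int) + 1 - 1) = (m : Int) * ((m : Int) - 1) + (m : Int) * 2 := by
      ring
    rw [h, Int.add_mul_ediv_right _ _ (by norm_num : (2:Int) ≠ 0)]
    rw [show (m : Int) * ((m : Int) - 1) / 2 = pvTri (m : Int) from rfl, ih]
    ring

theorem pvTri_mono (a b : Int) (ha : 1 ≤ a) (hab : a ≤ b) : pvTri a ≤ pvTri b := by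
  unfold pvTri
  apply Int.ediv_le_ediv (by norm_num)
  nlinarith

theorem pvTriGo_correct (s L : Int) (hL : 1 ≤ L) (hlo : pvTri L < s) (hhi : s ≤ pvTri (L + 1)) :
    ∀ (n : Nat) (lo hi : Int), (hi - lo).toNat = n → 1 ≤ lo → lo ≤ L → L ≤ hi →
      triGo s lo hi = L := by
  intro n
  induction n using Nat.strong_induction_on with
  | _ n ih =>
    intro lo hi hn h1 h2 h3
    rw [triGo]
    simp only []
    by_cases hlt : lo < hi
    · rw [if_pos hlt]
      have hdiv : PySem.Int.floordiv (lo + hi + 1) 2 = (lo + hi + 1) / 2 :=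
        PySem.Int.floordiv_eq_ediv_of_pos (by norm_num)
      have hmb : lo + 1 ≤ PySem.Int.floordiv (lo + hi + 1) 2
          ∧ PySem.Int.floordiv (lo + hi + 1) 2 ≤ hi := by
        rw [hdiv]; omega
      obtain ⟨hmb1, hmb2⟩ := hmb
      have htri : PySem.Int.floordiv (PySem.Int.floordiv (lo + hi + 1) 2
            * (PySem.Int.floordiv (lo + hi + 1) 2 - 1)) 2
          = pvTri (PySem.Int.floordiv (lo + hi + 1) 2) :=
        PySem.Int.floordiv_eq_ediv_of_pos (by norm_num)
      by_cases hc : PySem.Int.floordiv (PySem.Int.floordiv (lo + hi + 1) 2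
          * (PySem.Int.floordiv (lo + hi + 1) 2 - 1)) 2 < s
      · rw [if_pos hc]
        have hmidL : PySem.Int.floordiv (lo + hi + 1) 2 ≤ L := by
          by_contra hcon
          have hle : L + 1 ≤ PySem.Int.floordiv (lo + hi + 1) 2 := by omega
          have := pvTri_mono (L + 1) _ (by omega) hle
          rw [htri] at hc
          omega
        exact ih (hi - PySem.Int.floordiv (lo + hi + 1) 2).toNat (by omega) _ hi rfl
          (by omega) hmidL h3
      · rw [if_neg hc]
        have hLmid : L < PySem.Int.floordiv (lo + hi + 1) 2 := by
          by_contra hcon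
          have := pvTri_mono (PySem.Int.floordiv (lo + hi + 1) 2) L (by omega) (by omega)
          rw [htri] at hc
          omega
        exact ih (PySem.Int.floordiv (lo + hi + 1) 2 - 1 - lo).toNat (by omega) lo _ rfl
          h1 h2 (by omega)
    · rw [if_neg hlt]; omega

-- characterisation of A's pair list: the element at index i is determined by the
-- triangular bracket of s = pvTn m - i
theorem pvPairs_get (m : Nat) : ∀ (i : Nat) (h : i < (pvPairs m).length),
    ∃ L : Int, 1 ≤ L ∧ L ≤ (m : Int) - 1 ∧
      pvTri L < (pvTn m : Int) - i ∧ (pvTn m : Int) - i ≤ pvTri (L + 1) ∧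
      (pvPairs m)[i] = (L, ((pvTn m : Int) - i) - 1 - pvTri L) := by
  induction m with
  | zero => intro i h; simp [pvPairs] at h
  | succ m ih =>
    intro i h
    have hlen : (pvPairs (m + 1)).length = m + pvTn m := by
      rw [pvPairs_length]; rfl
    by_cases hi : i < m
    · refine ⟨(m : Int), by omega, by push_cast; omega, ?_, ?_, ?_⟩
      · rw [pvTri_cast]
        have : (pvTn (m+1) : Int) = (m : Int) + pvTn m := by push_cast [pvTn]; ring
        rw [this]; omega
      · have he : pvTri ((m : Int) + 1) = (pvTn (m+1) : Int) := by
          have := pvTri_cast (m + 1); push_cast at this ⊢; omega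
        rw [he]; omega
      · have hib : i < ((pvDesc m).map (fun b => ((m : Int), b))).length := by
          simpa [pvDesc_length] using hi
        rw [show (pvPairs (m+1))[i] = ((pvDesc m).map (fun b => ((m : Int), b)))[i] from
          (List.getElem_append_left hib)]
        rw [List.getElem_map]
        rw [pvDesc_get m i (by simpa [pvDesc_length] using hi)]
        have : (pvTn (m+1) : Int) = (m : Int) + pvTn m := by push_cast [pvTn]; ring
        rw [pvTri_cast, this]
        simp only [Prod.mk.injEq]
        exact ⟨trivial, by ring⟩
    · have hge : m ≤ i := by omega
      have hlb : ((pvDesc m).map (fun b => ((m : Int), b))).length = m := by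
        simp [pvDesc_length]
      have hi' : i - m < (pvPairs m).length := by
        rw [pvPairs_length]; omega
      obtain ⟨L, h1, h2, h3, h4, h5⟩ := ih (i - m) hi'
      refine ⟨L, h1, by push_cast; omega, ?_, ?_, ?_⟩
      · have : (pvTn (m+1) : Int) - i = (pvTn m : Int) - (i - m : Nat) := by
          push_cast [pvTn]; omega
        rw [this]; exact h3
      · have : (pvTn (m+1) : Int) - i = (pvTn m : Int) - (i - m : Nat) := by
          push_cast [pvTn]; omega
        rw [this]; exact h4
      · have hsplit : (pvPairs (m+1))[i]'h
            = (pvPairs m)[i - ((pvDesc m).map (fun b => ((m : Int), b))).length]'(by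
                rw [hlb]; exact hi') :=
          List.getElem_append_right (by rw [hlb]; omega)
        simp only [hlb] at hsplit
        rw [hsplit, h5]
        have : (pvTn (m+1) : Int) - i = (pvTn m : Int) - (i - m : Nat) := by
          push_cast [pvTn]; omega
        rw [this]

-- the main bridge: B's indexed bit loop equals A's sequential bit consumption over
-- any list whose elements satisfy the triangular bracket at their index
theorem pvBridge (hi : Int) (t : Int) (bv : Int) :
    ∀ (l : List (Int × Int)) (k : Int) (el : List (Int × Int)), 0 ≤ k →
      (∀ (i : Nat) (h : i < l.length),
        ∃ L : Int, 1 ≤ L ∧ L ≤ hi ∧ pvTri L < t - (k + i) ∧ t - (k + i) ≤ pvTri (L + 1) ∧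
          l[i] = (L, (t - (k + i)) - 1 - pvTri L)) →
      altLoop bv t hi k l.length el = el ++ pvPick (bv >>> k.toNat) l := by
  intro l
  induction l with
  | nil => intro k el _ _; simp [altLoop, pvPick]
  | cons p r ih =>
    intro k el hk hcond
    show altLoop bv t hi k (r.length + 1) el = _
    rw [altLoop]
    by_cases h0 : bv >>> k.toNat = 0
    · rw [if_pos h0, h0, pvPick_zero]
      simp
    · rw [if_neg h0]
      obtain ⟨L, hL1, hLhi, hb1, hb2, hp⟩ := hcond 0 (by simp)
      simp only [List.getElem_cons_zero] at hp
      have hband : PySem.Int.band (bv >>> k.toNat) 1 = PySem.Int.mod (bv >>> k.toNat) 2 :=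
        PySem.Int.band_one _
      have hshift : (bv >>> k.toNat) >>> (1 : Nat) = bv >>> (k + 1).toNat := by
        rw [← Int.shiftRight_add]
        congr 1
        omega
      have hrec : ∀ el', altLoop bv t hi (k + 1) r.length el'
          = el' ++ pvPick (bv >>> (k + 1).toNat) r := by
        intro el'
        apply ih (k + 1) el' (by omega)
        intro i hir
        obtain ⟨L', a1, a2, a3, a4, a5⟩ := hcond (i + 1) (by simpa using hir)
        refine ⟨L', a1, a2, ?_, ?_, ?_⟩
        · have : t - (k + 1 + i) = t - (k + (i + 1 : Nat)) := by push_cast; ring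
          rw [this]; exact a3
        · have : t - (k + 1 + i) = t - (k + (i + 1 : Nat)) := by push_cast; ring
          rw [this]; exact a4
        · simp only [List.getElem_cons_succ] at a5
          have : t - (k + 1 + i) = t - (k + (i + 1 : Nat)) := by push_cast; ring
          rw [this]; exact a5
      have hdec : (triRoot (t - k) hi,
          (t - k) - 1 - PySem.Int.floordiv (triRoot (t - k) hi * (triRoot (t - k) hi - 1)) 2)
          = p := by
        have hroot : triRoot (t - k) hi = L := by
          unfold triRoot
          exact pvTriGo_correct (t - k) L hL1
            (by simpa using hb1) (by simpa using hb2)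
            (hi - 1).toNat 1 hi rfl le_rfl hL1 hLhi
        rw [hroot, PySem.Int.floordiv_eq_ediv_of_pos (by norm_num : (0:Int) < 2)]
        rw [hp]
        simp [pvTri]
      by_cases hbit : PySem.Int.band (bv >>> k.toNat) 1 = 1
      · rw [if_pos hbit]
        rw [hrec]
        show (el ++ [(triRoot (t - k) hi,
            (t - k) - 1 - PySem.Int.floordiv (triRoot (t - k) hi * (triRoot (t - k) hi - 1)) 2)])
            ++ pvPick (bv >>> (k + 1).toNat) r
          = el ++ pvPick (bv >>> k.toNat) (p :: r)
        rw [pvPick]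
        rw [hband] at hbit
        rw [if_pos hbit, hshift, hdec]
        simp
      · rw [if_neg hbit]
        rw [hrec]
        rw [pvPick]
        rw [hband] at hbit
        rw [if_neg hbit, hshift]
        simp

-- ===== VERDICT (by name: the statement is the Claim_ definition above) =====
theorem get_el_from_bv_spec : Claim_equal_get_el_from_bv := by
  intro size bit_vector _
  unfold Spec_get_el_from_bv
  rw [pvA_char]
  unfold get_el_from_bv_alt
  by_cases hs : size < 2
  · rw [if_pos hs]
    have h01 : size.toNat = 0 ∨ size.toNat = 1 := by omega
    rcases h01 with h | h <;> rw [h]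
    · rfl
    · show pvPick bit_vector (List.map _ (pvDesc 0) ++ pvPairs 0) = []
      simp [pvDesc, pvPairs, pvPick]
  · rw [if_neg hs]
    have hs2 : (2 : Int) ≤ size := by omega
    have ht : PySem.Int.floordiv (size * (size - 1)) 2 = (pvTn size.toNat : Int) := by
      rw [PySem.Int.floordiv_eq_ediv_of_pos (by norm_num : (0:Int) < 2)]
      have : size = (size.toNat : Int) := (Int.toNat_of_nonneg (by omega)).symm
      rw [this, ← pvTri_cast]
      rfl
    rw [ht]
    have hlen : ((pvTn size.toNat : Int)).toNat = (pvPairs size.toNat).length := by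
      rw [pvPairs_length]; omega
    show pvPick bit_vector (pvPairs size.toNat)
      = altLoop bit_vector ((pvTn size.toNat : Int)) (size - 1) 0
          ((pvTn size.toNat : Int)).toNat []
    rw [hlen]
    rw [pvBridge (size - 1) ((pvTn size.toNat : Int)) bit_vector (pvPairs size.toNat) 0 []
      le_rfl ?_]
    · simp
    · intro i h
      obtain ⟨L, a1, a2, a3, a4, a5⟩ := pvPairs_get size.toNat i h
      refine ⟨L, a1, ?_, by simpa using a3, by simpa using a4, by simpa using a5⟩
      have : ((size.toNat : Int)) = size := Int.toNat_of_nonneg (by omega)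
      omega
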